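-- pv_equiv track=rewrite | github.com/nZiben/hku-comp7404-gmemory-poster-demo | demo/utils/demo_backend.py | _paired_plan
-- ===== SOURCE A (Python) =====
-- def _paired_plan(ball_count: int) -> list[str]:
--     actions = []
--     ball_index = 1
--     while ball_index <= ball_count:
--         first_ball = f"ball{ball_index}"
--         actions.append(f"pick {first_ball} rooma right")
--         if ball_index + 1 <= ball_count:
--             second_ball = f"ball{ball_index + 1}"
--             actions.append(f"pick {second_ball} rooma left")
--         actions.append("move rooma roomb")
--         actions.append(f"drop {first_ball} roomb right")
--         if ball_index + 1 <= ball_count: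
--             actions.append(f"drop {second_ball} roomb left")
--         if ball_index + 2 <= ball_count:
--             actions.append("move roomb rooma")
--         ball_index += 2
--     return actions
-- ===== SOURCE B (Python) =====
-- def _chunks(lo, hi):
--     # consecutive pairs [lo..hi], last chunk possibly a singleton
--     chunks = []
--     while lo <= hi:
--         if lo + 1 <= hi:
--             chunks.append([lo, lo + 1])
--         else:
--             chunks.append([lo])
--         lo += 2
--     return chunks
--
--
-- def _subplan(chunk):
--     sub = ["pick ball%d rooma right" % chunk[0]]
--     if len(chunk) == 2:
--         sub.append("pick ball%d rooma left" % chunk[1])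
--     sub.append("move rooma roomb")
--     sub.append("drop ball%d roomb right" % chunk[0])
--     if len(chunk) == 2:
--         sub.append("drop ball%d roomb left" % chunk[1])
--     return sub
--
--
-- def _paired_plan(ball_count: int) -> list[str]:
--     plans = [_subplan(c) for c in _chunks(1, ball_count)]
--     out = []
--     for sub in plans:
--         if out:
--             out.append("move roomb rooma")
--         out.extend(sub)
--     return out
-- ===== Notes on version B (the rewrite author's own statement) =====
-- stated objective: alternative
-- what changed: Replaces A's single imperative while-loop with inline lookahead guards by a structural decomposition: build the list of consecutive index pairs (chunks of 2, last possibly 1), map each chunk to its own sub-plan, and join the sub-plans with the single connector 'move roomb rooma' inserted only between sub-plans.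
import Mathlib
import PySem

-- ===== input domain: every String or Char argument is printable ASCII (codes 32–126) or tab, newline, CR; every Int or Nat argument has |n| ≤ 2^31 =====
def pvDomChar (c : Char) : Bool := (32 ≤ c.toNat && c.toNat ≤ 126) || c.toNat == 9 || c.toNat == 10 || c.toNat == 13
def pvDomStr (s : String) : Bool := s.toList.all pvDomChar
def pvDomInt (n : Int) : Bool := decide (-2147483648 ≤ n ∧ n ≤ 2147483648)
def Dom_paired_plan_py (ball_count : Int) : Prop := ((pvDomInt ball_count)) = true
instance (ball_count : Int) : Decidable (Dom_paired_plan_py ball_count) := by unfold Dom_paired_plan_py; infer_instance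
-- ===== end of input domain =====

-- B replaces A's single while-loop with inline lookahead guards by a pair-chunking
-- decomposition: per-chunk sub-plans joined by the connector (objective: alternative).

-- ===== PORT A =====
-- A's while-loop: ball_index starts at 1, advances by 2, appending to `actions`.
def pairedLoopA (ball_count ball_index : Int) (actions : List String) : List String :=
  if ball_index ≤ ball_count then
    let first := "ball" ++ PySem.Int.toStr ball_index
    let a1 := actions ++ ["pick " ++ first ++ " rooma right"]
    let a2 := if ball_index + 1 ≤ ball_count then
        a1 ++ ["pick " ++ ("ball" ++ PySem.Int.toStr (ball_index + 1)) ++ " rooma left"]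
      else a1
    let a3 := a2 ++ ["move rooma roomb"]
    let a4 := a3 ++ ["drop " ++ first ++ " roomb right"]
    let a5 := if ball_index + 1 ≤ ball_count then
        a4 ++ ["drop " ++ ("ball" ++ PySem.Int.toStr (ball_index + 1)) ++ " roomb left"]
      else a4
    let a6 := if ball_index + 2 ≤ ball_count then a5 ++ ["move roomb rooma"] else a5
    pairedLoopA ball_count (ball_index + 2) a6
  else actions
termination_by (ball_count + 1 - ball_index).toNat
decreasing_by omega

def paired_plan_py (ball_count : Int) : List String :=
  pairedLoopA ball_count 1 []

-- ===== PORT B =====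
-- _chunks: consecutive pairs [lo..hi], last chunk possibly a singleton (while-loop with accumulator)
def pairedChunksB (lo hi : Int) (chunks : List (List Int)) : List (List Int) :=
  if lo ≤ hi then
    pairedChunksB (lo + 2) hi
      (chunks ++ [if lo + 1 ≤ hi then [lo, lo + 1] else [lo]])
  else chunks
termination_by (hi + 1 - lo).toNat
decreasing_by omega

-- _subplan: chunk[0]/chunk[1] via pyGet? (chunks are never empty, so the default is unreachable)
def pairedSubplanB (c : List Int) : List String :=
  let fst := (PySem.List.pyGet? c 0).getD 0
  let s1 := ["pick ball" ++ PySem.Int.toStr fst ++ " rooma right"]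
  let s2 := if c.length == 2 then
      s1 ++ ["pick ball" ++ PySem.Int.toStr ((PySem.List.pyGet? c 1).getD 0) ++ " rooma left"]
    else s1
  let s3 := s2 ++ ["move rooma roomb"]
  let s4 := s3 ++ ["drop ball" ++ PySem.Int.toStr fst ++ " roomb right"]
  if c.length == 2 then
    s4 ++ ["drop ball" ++ PySem.Int.toStr ((PySem.List.pyGet? c 1).getD 0) ++ " roomb left"]
  else s4

def paired_plan_py_alt (ball_count : Int) : List String :=
  let plans := (pairedChunksB 1 ball_count []).map pairedSubplanB
  plans.foldl
    (fun out sub => (if out.isEmpty then out else out ++ ["move roomb rooma"]) ++ sub) []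

-- ===== PRECONDITION & SPEC =====
def Spec_paired_plan_py (ball_count : Int) (out : List String) : Prop := out = paired_plan_py_alt ball_count
instance (ball_count : Int) (out : List String) : Decidable (Spec_paired_plan_py ball_count out) := by unfold Spec_paired_plan_py; infer_instance

-- ===== CLAIM (what is proved, stated in full; the proofs are below) =====
def Claim_equal_paired_plan_py : Prop := ∀ (ball_count : Int), Dom_paired_plan_py ball_count → Spec_paired_plan_py ball_count (paired_plan_py ball_count)

-- ===== LEMMAS AND PROOFS =====

-- string-literal reassociations ("pick " ++ ("ball" ++ s) = "pick ball" ++ s etc.)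
theorem pv_pick (s : String) : "pick " ++ ("ball" ++ s) = "pick ball" ++ s := by
  rw [← String.append_assoc]; congr 1
theorem pv_drop (s : String) : "drop " ++ ("ball" ++ s) = "drop ball" ++ s := by
  rw [← String.append_assoc]; congr 1

-- the actions one loop iteration of A emits, minus the trailing connector
def pvBlock (hi lo : Int) : List String :=
  ["pick " ++ ("ball" ++ PySem.Int.toStr lo) ++ " rooma right"]
    ++ (if lo + 1 ≤ hi then ["pick " ++ ("ball" ++ PySem.Int.toStr (lo + 1)) ++ " rooma left"] else [])
    ++ ["move rooma roomb", "drop " ++ ("ball" ++ PySem.Int.toStr lo) ++ " roomb right"]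
    ++ (if lo + 1 ≤ hi then ["drop " ++ ("ball" ++ PySem.Int.toStr (lo + 1)) ++ " roomb left"] else [])

theorem loopA_stop (hi lo : Int) (acc : List String) (h : ¬ lo ≤ hi) :
    pairedLoopA hi lo acc = acc := by
  rw [pairedLoopA]; simp [h]

theorem loopA_pos (hi lo : Int) (acc : List String) (h : lo ≤ hi) :
    pairedLoopA hi lo acc
      = pairedLoopA hi (lo + 2)
          (acc ++ pvBlock hi lo ++ (if lo + 2 ≤ hi then ["move roomb rooma"] else [])) := by
  rw [pairedLoopA]
  simp only [if_pos h]
  congr 1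
  simp only [pvBlock]
  split_ifs <;> simp

theorem subplan_pair (hi lo : Int) (h1 : lo + 1 ≤ hi) :
    pvBlock hi lo = pairedSubplanB [lo, lo + 1] := by
  simp [pvBlock, pairedSubplanB, PySem.List.pyGet?, PySem.List.pyIdx?, h1, pv_pick, pv_drop]

theorem subplan_single (hi lo : Int) (h1 : ¬ lo + 1 ≤ hi) :
    pvBlock hi lo = pairedSubplanB [lo] := by
  simp [pvBlock, pairedSubplanB, PySem.List.pyGet?, PySem.List.pyIdx?, h1, pv_pick, pv_drop]

theorem loopA_acc (n : Nat) (hi lo : Int) (acc : List String)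
    (hn : (hi + 1 - lo).toNat ≤ n) :
    pairedLoopA hi lo acc = acc ++ pairedLoopA hi lo [] := by
  induction n generalizing lo acc with
  | zero =>
    rw [loopA_stop hi lo acc (by omega), loopA_stop hi lo [] (by omega)]
    simp
  | succ n ih =>
    by_cases h : lo ≤ hi
    · have e : ∀ X, pairedLoopA hi (lo + 2) X = X ++ pairedLoopA hi (lo + 2) [] :=
        fun X => ih (lo + 2) X (by omega)
      rw [loopA_pos hi lo acc h, loopA_pos hi lo [] h]
      conv_lhs => rw [e]
      conv_rhs => rw [e]
      simp
    · rw [loopA_stop hi lo acc h, loopA_stop hi lo [] h]; simp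

-- join of sub-plans with the connector strictly between them
def pvJ : List (List String) → List String
  | [] => []
  | p :: ps => p ++ ps.flatMap (fun s => "move roomb rooma" :: s)

theorem pvJ_tail (ps : List (List String)) (h : ps ≠ []) :
    ps.flatMap (fun s => "move roomb rooma" :: s) = "move roomb rooma" :: pvJ ps := by
  cases ps with
  | nil => exact absurd rfl h
  | cons q qs => simp [pvJ]

theorem chunksB_nil (hi lo : Int) (h : ¬ lo ≤ hi) : pairedChunksB lo hi [] = [] := by
  rw [pairedChunksB]; simp [h]

theorem chunksB_acc (n : Nat) (hi lo : Int) (acc : List (List Int))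
    (hn : (hi + 1 - lo).toNat ≤ n) :
    pairedChunksB lo hi acc = acc ++ pairedChunksB lo hi [] := by
  induction n generalizing lo acc with
  | zero =>
    rw [chunksB_nil hi lo (by omega), pairedChunksB]
    simp [show ¬ lo ≤ hi from by omega]
  | succ n ih =>
    by_cases h : lo ≤ hi
    · rw [pairedChunksB]
      conv_rhs => rw [pairedChunksB]
      simp only [if_pos h]
      rw [ih (lo + 2) _ (by omega)]
      conv_rhs => rw [ih (lo + 2) _ (by omega)]
      simp
    · rw [pairedChunksB]
      conv_rhs => rw [pairedChunksB]
      simp [h]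

theorem chunksB_cons (hi lo : Int) (h : lo ≤ hi) :
    pairedChunksB lo hi []
      = (if lo + 1 ≤ hi then [lo, lo + 1] else [lo]) :: pairedChunksB (lo + 2) hi [] := by
  conv_lhs => rw [pairedChunksB]
  rw [if_pos h, chunksB_acc ((hi + 1 - (lo + 2)).toNat) hi (lo + 2) _ (le_refl _)]
  simp

theorem pairedLoopA_eq_J (n : Nat) (hi lo : Int)
    (hn : (hi + 1 - lo).toNat ≤ n) :
    pairedLoopA hi lo [] = pvJ ((pairedChunksB lo hi []).map pairedSubplanB) := by
  induction n generalizing lo with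
  | zero =>
    rw [loopA_stop hi lo [] (by omega), chunksB_nil hi lo (by omega)]
    simp [pvJ]
  | succ n ih =>
    by_cases h : lo ≤ hi
    · rw [loopA_pos hi lo [] h,
          loopA_acc ((hi + 1 - (lo + 2)).toNat) hi (lo + 2) _ (le_refl _),
          ih (lo + 2) (by omega), chunksB_cons hi lo h]
      by_cases h1 : lo + 1 ≤ hi
      · simp only [if_pos h1, List.map_cons, pvJ, ← subplan_pair hi lo h1]
        by_cases h2 : lo + 2 ≤ hi
        · have : (pairedChunksB (lo + 2) hi []).map pairedSubplanB ≠ [] := by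
            rw [chunksB_cons hi (lo + 2) h2]; simp
          rw [pvJ_tail _ this, pvJ.eq_def]
          simp [h2]
        · have hend : pairedChunksB (lo + 2) hi [] = [] := chunksB_nil hi (lo + 2) (by omega)
          simp [h2, hend]
      · have h2 : ¬ lo + 2 ≤ hi := by omega
        have hend : pairedChunksB (lo + 2) hi [] = [] := chunksB_nil hi (lo + 2) (by omega)
        simp only [if_neg h1, List.map_cons, List.map_nil, pvJ, ← subplan_single hi lo h1,
          h2, if_false, hend]
        simp
    · rw [loopA_stop hi lo [] h, chunksB_nil hi lo h]
      simp [pvJ]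

theorem foldl_join_ne (ps : List (List String)) (out : List String) (h : out ≠ []) :
    ps.foldl (fun out sub => (if out.isEmpty then out else out ++ ["move roomb rooma"]) ++ sub) out
      = out ++ ps.flatMap (fun s => "move roomb rooma" :: s) := by
  induction ps generalizing out with
  | nil => simp
  | cons p ps ih =>
    simp only [List.foldl, List.flatMap_cons]
    rw [if_neg (by simpa using h), ih _ (by simp)]
    simp

theorem subplanB_ne (c : List Int) : pairedSubplanB c ≠ [] := by
  simp only [pairedSubplanB]
  split_ifs <;> simp

theorem alt_eq_J (ps : List (List String)) (hne : ∀ p ∈ ps, p ≠ []) :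
    ps.foldl (fun out sub => (if out.isEmpty then out else out ++ ["move roomb rooma"]) ++ sub) []
      = pvJ ps := by
  cases ps with
  | nil => simp [pvJ]
  | cons p ps =>
    simp only [List.foldl, List.isEmpty_nil, if_true, List.nil_append]
    rw [foldl_join_ne ps p (hne p (by simp))]
    simp [pvJ]

-- ===== VERDICT (by name: the statement is the Claim_ definition above) =====
theorem paired_plan_py_spec : Claim_equal_paired_plan_py := by
  intro bc _
  unfold Spec_paired_plan_py paired_plan_py paired_plan_py_alt
  rw [pairedLoopA_eq_J (bc + 1 - 1).toNat bc 1 (le_refl _)]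
  rw [alt_eq_J]
  intro p hp
  simp only [List.mem_map] at hp
  obtain ⟨c, _, rfl⟩ := hp
  exact subplanB_ne c
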